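-- pv_equiv track=rewrite | github.com/Moramarth/SoftUni-Programing-Fundamentals-with-Python-september-2022 | text_processing/exercise_10_winning_ticket.py | winning_or_not
-- ===== SOURCE A (Python) =====
-- def winning_or_not(item):
--     first_half = item[:10]
--     second_half = item[10:]
--     for symbol in winning_symbols:
--         for repeats in range(10, 5, -1):
--             needed_match = repeats * symbol
--             if needed_match in first_half and needed_match in second_half:
--                 if repeats == 10:
--                     return f'ticket "{item}" - 10{symbol} Jackpot!'
--                 return f'ticket "{item}" - {repeats}{symbol}'
--     return f'ticket "{item}" - no match'
--
-- winning_symbols = ["@", "$", "#", "^"]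
-- ===== SOURCE B (Python) =====
-- winning_symbols = ["@", "$", "#", "^"]
--
--
-- def _longest_run(s, ch):
--     """Length of the longest consecutive run of ch in s (single counter scan)."""
--     best = 0
--     cur = 0
--     for x in s:
--         cur = cur + 1 if x == ch else 0
--         if cur > best:
--             best = cur
--     return best
--
--
-- def winning_or_not(item):
--     first_half = item[:10]
--     second_half = item[10:]
--     for symbol in winning_symbols:
--         m = min(_longest_run(first_half, symbol), _longest_run(second_half, symbol))
--         if m >= 6:
--             if m == 10:
--                 return f'ticket "{item}" - 10{symbol} Jackpot!'
--             return f'ticket "{item}" - {m}{symbol}'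
--     return f'ticket "{item}" - no match'
-- ===== Notes on version B (the rewrite author's own statement) =====
-- stated objective: alternative
-- what changed: A probes each half with up to 20 substring-membership searches (repeats*symbol for repeats 10..6 per symbol); B instead computes the longest consecutive run of each winning symbol in each half with a single counter scan and decides directly on m = min of the two run lengths.
import Mathlib
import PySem

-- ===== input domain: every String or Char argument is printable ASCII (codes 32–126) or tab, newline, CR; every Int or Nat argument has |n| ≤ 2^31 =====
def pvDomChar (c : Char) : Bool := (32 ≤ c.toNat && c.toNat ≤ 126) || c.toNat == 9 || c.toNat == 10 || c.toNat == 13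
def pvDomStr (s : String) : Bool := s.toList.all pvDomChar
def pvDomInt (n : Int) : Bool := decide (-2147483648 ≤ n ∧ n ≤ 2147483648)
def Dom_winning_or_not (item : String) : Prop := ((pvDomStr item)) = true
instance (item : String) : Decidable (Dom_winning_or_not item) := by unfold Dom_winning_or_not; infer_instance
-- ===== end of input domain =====

-- B replaces A's 20 substring searches (repeats*symbol in each half) by one run-length
-- counter scan per symbol and half, deciding on m = min of the two longest runs (objective: alternative).

-- ===== PORT A =====
-- winning_symbols = ["@", "$", "#", "^"]  (one-character Python strings ported as Char)
def pyWinningSymbols : List Char := ['@', '$', '#', '^']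

-- inner loop 'for repeats in range(10, 5, -1): …' (repeats is positive here, so
-- 'repeats * symbol' is ported exactly as replicate repeats.toNat symbol)
def aInner (item : String) (fh sh : String) (symbol : Char) : List Int → Option String
  | [] => none
  | r :: rs =>
      let needed := String.ofList (List.replicate r.toNat symbol)
      if PySem.Str.isIn needed fh && PySem.Str.isIn needed sh then
        if r == 10 then
          some ("ticket \"" ++ item ++ "\" - 10" ++ String.ofList [symbol] ++ " Jackpot!")
        else
          some ("ticket \"" ++ item ++ "\" - " ++ PySem.Int.toStr r ++ String.ofList [symbol])
      else aInner item fh sh symbol rs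

-- outer loop 'for symbol in winning_symbols: …'
def aOuter (item : String) (fh sh : String) : List Char → String
  | [] => "ticket \"" ++ item ++ "\" - no match"
  | symbol :: rest =>
      match aInner item fh sh symbol (PySem.List.pyRange 10 5 (-1)) with
      | some res => res
      | none => aOuter item fh sh rest

def winning_or_not (item : String) : String :=
  let first_half := PySem.Str.slice item none (some 10)
  let second_half := PySem.Str.slice item (some 10) none
  aOuter item first_half second_half pyWinningSymbols

-- ===== PORT B =====
-- one step of _longest_run's loop body: cur = cur + 1 if x == ch else 0; best = max
def runStep (ch : Char) (p : Nat × Nat) (x : Char) : Nat × Nat :=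
  let cur := if x == ch then p.2 + 1 else 0
  (if cur > p.1 then cur else p.1, cur)

-- _longest_run(s, ch): single counter scan, (best, cur) accumulator
def longestRun (s : String) (ch : Char) : Nat :=
  (s.toList.foldl (runStep ch) (0, 0)).1

def bLoop (item : String) (fh sh : String) : List Char → String
  | [] => "ticket \"" ++ item ++ "\" - no match"
  | symbol :: rest =>
      let m := min (longestRun fh symbol) (longestRun sh symbol)
      if 6 ≤ m then
        if m == 10 then
          "ticket \"" ++ item ++ "\" - 10" ++ String.ofList [symbol] ++ " Jackpot!"
        else
          "ticket \"" ++ item ++ "\" - " ++ PySem.Int.toStr (m : Int) ++ String.ofList [symbol]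
      else bLoop item fh sh rest

def winning_or_not_alt (item : String) : String :=
  let first_half := PySem.Str.slice item none (some 10)
  let second_half := PySem.Str.slice item (some 10) none
  bLoop item first_half second_half pyWinningSymbols

-- ===== PRECONDITION & SPEC =====
def Spec_winning_or_not (item : String) (out : String) : Prop := out = winning_or_not_alt item
instance (item : String) (out : String) : Decidable (Spec_winning_or_not item out) := by unfold Spec_winning_or_not; infer_instance

-- ===== CLAIM (what is proved, stated in full; the proofs are below) =====
def Claim_equal_winning_or_not : Prop := ∀ (item : String), Dom_winning_or_not item → Spec_winning_or_not item (winning_or_not item)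

-- ===== LEMMAS AND PROOFS =====

-- leading run of ch in l
def leadRun (ch : Char) : List Char → Nat
  | [] => 0
  | x :: xs => if x = ch then leadRun ch xs + 1 else 0

-- longest run of ch in l, structural (from the front)
def maxRunR (ch : Char) : List Char → Nat
  | [] => 0
  | x :: xs => max (if x = ch then leadRun ch xs + 1 else 0) (maxRunR ch xs)

theorem replicate_prefix_iff (ch : Char) (l : List Char) (k : Nat) :
    List.replicate k ch <+: l ↔ k ≤ leadRun ch l := by
  induction l generalizing k with
  | nil =>
      cases k with
      | zero => simp [leadRun]
      | succ n => simp [List.replicate_succ, leadRun]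
  | cons x xs ih =>
      cases k with
      | zero => simp [List.replicate]
      | succ n =>
          simp only [List.replicate_succ, List.cons_prefix_cons, leadRun]
          by_cases hx : x = ch
          · subst hx
            simp [ih]
          · simp [hx, Ne.symm hx]

theorem replicate_infix_iff (ch : Char) (l : List Char) (k : Nat) :
    List.replicate k ch <:+: l ↔ k ≤ maxRunR ch l := by
  induction l generalizing k with
  | nil =>
      cases k with
      | zero => simp [maxRunR]
      | succ n => simp [List.replicate_succ, maxRunR]
  | cons x xs ih =>
      rw [List.infix_cons_iff, maxRunR]
      have hpre := replicate_prefix_iff ch (x :: xs) k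
      rw [leadRun] at hpre
      rw [hpre, ih]
      omega

theorem foldr_runStep (ch : Char) (l : List Char) :
    l.foldr (fun x p => runStep ch p x) (0, 0) = (maxRunR ch l, leadRun ch l) := by
  induction l with
  | nil => rfl
  | cons x xs ih =>
      rw [List.foldr_cons, ih]
      simp only [runStep, maxRunR, leadRun]
      by_cases hx : x = ch
      · simp only [hx, beq_self_eq_true, if_true]
        have hmax : (if leadRun ch xs + 1 > maxRunR ch xs then leadRun ch xs + 1
            else maxRunR ch xs) = max (leadRun ch xs + 1) (maxRunR ch xs) := by split_ifs <;> omega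
        rw [hmax]
      · simp [hx]

theorem longestRun_eq (s : String) (ch : Char) :
    longestRun s ch = maxRunR ch s.toList.reverse := by
  unfold longestRun
  rw [← List.foldr_reverse, foldr_runStep]

theorem replicate_infix_iff_longestRun (s : String) (ch : Char) (k : Nat) :
    List.replicate k ch <:+: s.toList ↔ k ≤ longestRun s ch := by
  rw [longestRun_eq, ← replicate_infix_iff]
  constructor
  · intro h
    have := List.reverse_infix.mpr h
    simpa [List.reverse_replicate] using this
  · intro h
    have := List.reverse_infix.mpr h
    simpa [List.reverse_replicate] using this

theorem longestRun_le_length (s : String) (ch : Char) :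
    longestRun s ch ≤ s.toList.length := by
  have h := (replicate_infix_iff_longestRun s ch (longestRun s ch)).mpr le_rfl
  have := h.length_le
  simpa using this

-- the pair of substring tests, as a decidable bound on m
theorem cond_eq (fh sh : String) (ch : Char) (k : Nat) :
    (PySem.Str.isIn (String.ofList (List.replicate k ch)) fh &&
      PySem.Str.isIn (String.ofList (List.replicate k ch)) sh)
    = decide (k ≤ min (longestRun fh ch) (longestRun sh ch)) := by
  rw [Bool.eq_iff_iff]
  simp only [Bool.and_eq_true, decide_eq_true_eq, le_min_iff]
  rw [PySem.Str.isIn_iff_infix, PySem.Str.isIn_iff_infix]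
  simp [replicate_infix_iff_longestRun]

theorem aInner_eq (item fh sh : String) (symbol : Char)
    (h10 : min (longestRun fh symbol) (longestRun sh symbol) ≤ 10) :
    aInner item fh sh symbol [10, 9, 8, 7, 6] =
      (if 6 ≤ min (longestRun fh symbol) (longestRun sh symbol) then
        some (if min (longestRun fh symbol) (longestRun sh symbol) = 10 then
          "ticket \"" ++ item ++ "\" - 10" ++ String.ofList [symbol] ++ " Jackpot!"
        else
          "ticket \"" ++ item ++ "\" - " ++
            PySem.Int.toStr ((min (longestRun fh symbol) (longestRun sh symbol) : Nat) : Int) ++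
            String.ofList [symbol])
      else none) := by
  set m := min (longestRun fh symbol) (longestRun sh symbol) with hm
  have t10 : ((10 : Int)).toNat = 10 := rfl
  have t9 : ((9 : Int)).toNat = 9 := rfl
  have t8 : ((8 : Int)).toNat = 8 := rfl
  have t7 : ((7 : Int)).toNat = 7 := rfl
  have t6 : ((6 : Int)).toNat = 6 := rfl
  simp only [aInner, t10, t9, t8, t7, t6, cond_eq fh sh symbol, ← hm, decide_eq_true_eq]
  rcases Nat.lt_or_ge m 6 with h6 | h6
  · rw [if_neg (by omega), if_neg (by omega), if_neg (by omega),
      if_neg (by omega), if_neg (by omega), if_neg (by omega)]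
  · interval_cases m <;> norm_num

theorem loops_eq (item fh sh : String) (h10 : fh.toList.length ≤ 10) :
    ∀ syms : List Char, aOuter item fh sh syms = bLoop item fh sh syms := by
  intro syms
  induction syms with
  | nil => rfl
  | cons symbol rest ih =>
      have hrange : PySem.List.pyRange 10 5 (-1) = [10, 9, 8, 7, 6] := by decide
      have hm10 : min (longestRun fh symbol) (longestRun sh symbol) ≤ 10 :=
        le_trans (le_trans (min_le_left _ _) (longestRun_le_length fh symbol)) h10
      rw [aOuter, bLoop, hrange, aInner_eq item fh sh symbol hm10]
      set m := min (longestRun fh symbol) (longestRun sh symbol) with hm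
      by_cases h6 : 6 ≤ m
      · rw [if_pos h6, if_pos h6]
        by_cases hj : m = 10
        · simp [hj]
        · simp [hj]
      · rw [if_neg h6, if_neg h6]
        exact ih

theorem first_half_len (item : String) :
    (PySem.Str.slice item none (some 10)).toList.length ≤ 10 := by
  have h : (PySem.Str.slice item none (some 10)).toList = item.toList.take 10 := by
    simp [PySem.Str.slice]
    rw [show ((10 : Int) = ((10 : Nat) : Int)) from rfl, PySem.List.slice_to_natCast]
  rw [h]
  simp

-- ===== VERDICT (by name: the statement is the Claim_ definition above) =====
theorem winning_or_not_spec : Claim_equal_winning_or_not := by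
  intro item _
  unfold Spec_winning_or_not winning_or_not winning_or_not_alt
  exact loops_eq item _ _ (first_half_len item) pyWinningSymbols
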